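-- pv_equiv track=rewrite | github.com/sraaphorst/de-bruijn-sequences | de-bruijn.py | _degree_condition
-- ===== SOURCE A (Python) =====
-- from typing import Optional, TypeAlias, TypeVar
--
-- T = TypeVar('T')
--
-- adjacency_list: TypeAlias = dict[T, set[T]]
--
-- def _degree_condition(digraph: adjacency_list[T]) -> bool:
--     """
--     Check that the in-degree count of every vertex is equal to the out-degree count.
--     :param digraph: the adjacency list of the graph or digraph
--     :type digraph: the type of the graph's vertices
--     :return: true if the condition is satisfied, false otherwise
--     :rtype: bool
--     """
--     in_degree = {v: 0 for v in digraph}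
--     out_degree = {v: 0 for v in digraph}
--
--     for v, successors in digraph.items():
--         out_degree[v] = len(successors)
--         for vp in successors:
--             in_degree[vp] += 1
--
--     return all(in_degree[v] == out_degree[v] for v in digraph)
-- ===== SOURCE B (Python) =====
-- from typing import TypeAlias, TypeVar
--
-- T = TypeVar('T')
--
-- adjacency_list: TypeAlias = dict[T, set[T]]
--
-- def _degree_condition(digraph: adjacency_list[T]) -> bool:
--     # Multiset comparison instead of degree counters: number the vertices
--     # (vertices of type T need not be orderable, indices are), then the
--     # in/out degrees agree everywhere iff the sorted list of edge-head
--     # indices equals the sorted list of edge-tail indices.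
--     index = {v: i for i, v in enumerate(digraph)}
--     heads = sorted(index[vp] for successors in digraph.values() for vp in successors)
--     tails = sorted(i for i, successors in enumerate(digraph.values()) for _ in successors)
--     return heads == tails
-- ===== Notes on version B (the rewrite author's own statement) =====
-- stated objective: alternative
-- what changed: Replaces the per-vertex in/out degree counters by a multiset comparison: sort the list of all edge heads and the list of all edge tails and compare the two sorted lists for equality.
import Mathlib
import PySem

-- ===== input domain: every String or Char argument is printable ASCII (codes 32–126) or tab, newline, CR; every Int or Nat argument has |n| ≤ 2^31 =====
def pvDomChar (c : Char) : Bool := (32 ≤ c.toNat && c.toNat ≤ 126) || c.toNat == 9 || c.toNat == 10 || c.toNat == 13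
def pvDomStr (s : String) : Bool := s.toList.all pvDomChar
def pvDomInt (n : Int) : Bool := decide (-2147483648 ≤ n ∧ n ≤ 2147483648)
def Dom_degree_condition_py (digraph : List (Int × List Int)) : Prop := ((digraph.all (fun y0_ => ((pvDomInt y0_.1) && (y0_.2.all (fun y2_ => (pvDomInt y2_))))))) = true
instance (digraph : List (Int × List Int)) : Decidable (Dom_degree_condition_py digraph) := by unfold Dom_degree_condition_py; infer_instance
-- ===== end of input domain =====

-- B replaces A's per-vertex in/out degree counters by a multiset comparison:
-- number the vertices, then compare the sorted list of edge-head indices with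
-- the sorted list of edge-tail indices (objective: alternative).

-- ===== PORT A =====
def degree_condition_py (digraph : List (Int × List Int)) : Bool :=
  let in_degree : PySem.Dict Int Int :=
    digraph.foldl (fun d e => d.insert e.1 0) PySem.Dict.empty
  let out_degree : PySem.Dict Int Int :=
    digraph.foldl (fun d e => d.insert e.1 0) PySem.Dict.empty
  let st :=
    digraph.foldl
      (fun (p : PySem.Dict Int Int × PySem.Dict Int Int) e =>
        (e.2.foldl (fun d vp => d.insert vp (d.getD vp 0 + 1)) p.1,
         p.2.insert e.1 (e.2.length : Int)))
      (in_degree, out_degree)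
  digraph.all (fun e => st.1.getD e.1 0 == st.2.getD e.1 0)

-- ===== PORT B =====
-- 'index[vp]' raises KeyError on a vertex that is not a key: ported as get? with
-- default 0; exactly those inputs are excluded by Pre_ below.
def degree_condition_py_alt (digraph : List (Int × List Int)) : Bool :=
  let index : PySem.Dict Int Int :=
    (PySem.List.enumerate digraph 0).foldl (fun d p => d.insert p.2.1 p.1) PySem.Dict.empty
  let heads := PySem.List.sorted
    (digraph.flatMap (fun e => e.2.map (fun vp => (index.get? vp).getD 0))) (fun x => x) false
  let tails := PySem.List.sorted
    ((PySem.List.enumerate digraph 0).flatMap (fun p => p.2.2.map (fun _ => p.1))) (fun x => x) false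
  heads == tails

-- ===== PRECONDITION & SPEC =====
-- Pre_ excludes inputs with a successor vertex that is not a key (there both A and B raise
-- KeyError), and association lists with duplicate keys, which cannot arise from a Python dict.
def Pre_degree_condition_py (digraph : List (Int × List Int)) : Prop :=
  (digraph.map Prod.fst).Nodup ∧
  ∀ e ∈ digraph, ∀ u ∈ e.2, u ∈ digraph.map Prod.fst
instance (digraph : List (Int × List Int)) : Decidable (Pre_degree_condition_py digraph) := by
  unfold Pre_degree_condition_py; infer_instance
def pvWitness_degree_condition_py : (List (Int × List Int)) := [(0, [1]), (1, [0, 1])]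
def Spec_degree_condition_py (digraph : List (Int × List Int)) (out : Bool) : Prop := out = degree_condition_py_alt digraph
instance (digraph : List (Int × List Int)) (out : Bool) : Decidable (Spec_degree_condition_py digraph out) := by unfold Spec_degree_condition_py; infer_instance

-- ===== CLAIM (what is proved, stated in full; the proofs are below) =====
def Claim_equal_degree_condition_py : Prop := ∀ (digraph : List (Int × List Int)), Dom_degree_condition_py digraph → Pre_degree_condition_py digraph → Spec_degree_condition_py digraph (degree_condition_py digraph)

-- ===== LEMMAS AND PROOFS =====

-- the zero-initialised dict reads 0 everywhere (stored 0 or the default 0)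
theorem pv_getD_init_zero (xs : List (Int × List Int)) (d : PySem.Dict Int Int)
    (v : Int) (h : d.getD v 0 = 0) :
    (xs.foldl (fun d e => d.insert e.1 0) d).getD v 0 = 0 := by
  induction xs generalizing d with
  | nil => simpa using h
  | cons a t ih =>
      simp only [List.foldl_cons]
      exact ih _ (by rw [PySem.Dict.getD_insert]; split_ifs <;> simp [h])

-- the '+1 per occurrence' inner loop adds the count
theorem pv_getD_incr (s : List Int) (d : PySem.Dict Int Int) (v : Int) :
    (s.foldl (fun d vp => d.insert vp (d.getD vp 0 + 1)) d).getD v 0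
      = d.getD v 0 + (s.count v : Int) := by
  induction s generalizing d with
  | nil => simp
  | cons a t ih =>
      simp only [List.foldl_cons, ih, PySem.Dict.getD_insert, List.count_cons]
      by_cases h : a = v
      · subst h; simp; omega
      · have h' : ¬ v = a := fun hh => h hh.symm
        simp [h, h']

-- A's in-degree loop counts occurrences across all successor lists
theorem pv_getD_ind (xs : List (Int × List Int)) (d : PySem.Dict Int Int) (v : Int) :
    (xs.foldl (fun d e => e.2.foldl (fun d vp => d.insert vp (d.getD vp 0 + 1)) d) d).getD v 0
      = d.getD v 0 + ((xs.flatMap (fun e => e.2)).count v : Int) := by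
  induction xs generalizing d with
  | nil => simp
  | cons a t ih =>
      simp only [List.foldl_cons, ih, pv_getD_incr, List.flatMap_cons, List.count_append]
      push_cast; ring

-- keys not written are untouched by the out-degree loop
theorem pv_getD_outd_untouched (xs : List (Int × List Int)) (d : PySem.Dict Int Int)
    (v : Int) (hv : v ∉ xs.map Prod.fst) :
    (xs.foldl (fun d e => d.insert e.1 ((e.2.length : Int))) d).getD v 0 = d.getD v 0 := by
  induction xs generalizing d with
  | nil => simp
  | cons a t ih =>
      simp only [List.map_cons, List.mem_cons, not_or] at hv
      simp only [List.foldl_cons, ih _ hv.2, PySem.Dict.getD_insert]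
      simp [hv.1]

-- under distinct keys, A's out-degree of a key is the length of its successor list
theorem pv_getD_outd (xs : List (Int × List Int)) (d : PySem.Dict Int Int)
    (v : Int) (s : List Int) (hnd : (xs.map Prod.fst).Nodup) (hm : (v, s) ∈ xs) :
    (xs.foldl (fun d e => d.insert e.1 ((e.2.length : Int))) d).getD v 0 = (s.length : Int) := by
  induction xs generalizing d with
  | nil => simp at hm
  | cons a t ih =>
      simp only [List.map_cons, List.nodup_cons] at hnd
      rcases List.mem_cons.mp hm with h | h
      · have hv : v ∉ t.map Prod.fst := by
          rw [← h] at hnd; exact hnd.1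
        simp only [List.foldl_cons]
        rw [pv_getD_outd_untouched t _ v hv, ← h, PySem.Dict.getD_insert]
        simp
      · have hav : a.1 ≠ v := by
          intro hh
          exact hnd.1 (hh ▸ (List.mem_map.mpr ⟨(v, s), h, rfl⟩))
        simp only [List.foldl_cons]
        exact ih _ hnd.2 h

-- count of a key in B's edge-tail list (before indexing): its successor-list length
theorem pv_count_const (l : List Int) (c v : Int) :
    (l.map (fun _ => c)).count v = if c = v then l.length else 0 := by
  induction l with
  | nil => simp
  | cons a t ih =>
      simp only [List.map_cons, List.count_cons, ih]
      split_ifs <;> simp_all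

theorem pv_count_sources_of_mem (xs : List (Int × List Int)) (v : Int) (s : List Int)
    (hnd : (xs.map Prod.fst).Nodup) (hm : (v, s) ∈ xs) :
    (xs.flatMap (fun e => e.2.map (fun _ => e.1))).count v = s.length := by
  induction xs with
  | nil => simp at hm
  | cons a t ih =>
      simp only [List.map_cons, List.nodup_cons] at hnd
      simp only [List.flatMap_cons, List.count_append, pv_count_const]
      rcases List.mem_cons.mp hm with h | h
      · have hv : v ∉ t.map Prod.fst := by rw [← h] at hnd; exact hnd.1
        have hz : (t.flatMap (fun e => e.2.map (fun _ => e.1))).count v = 0 := by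
          rw [List.count_eq_zero]
          intro hmem
          rcases List.mem_flatMap.mp hmem with ⟨e, he, hve⟩
          rcases List.mem_map.mp hve with ⟨_, _, hc⟩
          exact hv (List.mem_map.mpr ⟨e, he, hc⟩)
        rw [← h, hz]; simp
      · have hav : ¬ (a.1 = v) := fun hh =>
          hnd.1 (hh ▸ (List.mem_map.mpr ⟨(v, s), h, rfl⟩))
        rw [if_neg hav, ih hnd.2 h]; simp

theorem pv_count_sources_not_mem (xs : List (Int × List Int)) (v : Int)
    (hv : v ∉ xs.map Prod.fst) :
    (xs.flatMap (fun e => e.2.map (fun _ => e.1))).count v = 0 := by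
  rw [List.count_eq_zero]
  intro hmem
  rcases List.mem_flatMap.mp hmem with ⟨e, he, hve⟩
  rcases List.mem_map.mp hve with ⟨_, _, hc⟩
  exact hv (List.mem_map.mpr ⟨e, he, hc⟩)

-- every element of the edge-tail list is a key
theorem pv_sources_subset (xs : List (Int × List Int)) (u : Int)
    (hu : u ∈ xs.flatMap (fun e => e.2.map (fun _ => e.1))) : u ∈ xs.map Prod.fst := by
  rcases List.mem_flatMap.mp hu with ⟨e, he, hue⟩
  rcases List.mem_map.mp hue with ⟨_, _, hc⟩
  exact List.mem_map.mpr ⟨e, he, hc⟩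

theorem pv_all_congr {α : Type} (l : List α) (f g : α → Bool)
    (h : ∀ x ∈ l, f x = g x) : l.all f = l.all g := by
  induction l with
  | nil => rfl
  | cons a t ih =>
      simp only [List.all_cons, h a (List.mem_cons_self ..),
        ih (fun x hx => h x (List.mem_cons_of_mem a hx))]

-- the degree condition over the keys is exactly the head/tail multiset equality
theorem pv_perm_iff (xs : List (Int × List Int))
    (hnd : (xs.map Prod.fst).Nodup)
    (hcl : ∀ e ∈ xs, ∀ u ∈ e.2, u ∈ xs.map Prod.fst) :
    ((xs.flatMap (fun e => e.2)).Perm (xs.flatMap (fun e => e.2.map (fun _ => e.1))))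
    ↔ (∀ e ∈ xs, ((xs.flatMap (fun e => e.2)).count e.1 : Int) = (e.2.length : Int)) := by
  rw [List.perm_iff_count]
  constructor
  · intro h e he
    rw [h e.1, pv_count_sources_of_mem xs e.1 e.2 hnd (by simpa using he)]
  · intro h v
    by_cases hv : v ∈ xs.map Prod.fst
    · rcases List.mem_map.mp hv with ⟨e, he, hev⟩
      subst hev
      have hh := h e he
      rw [pv_count_sources_of_mem xs e.1 e.2 hnd (by simpa using he)]
      omega
    · have hT : (xs.flatMap (fun e => e.2)).count v = 0 := by
        rw [List.count_eq_zero]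
        intro hmem
        rcases List.mem_flatMap.mp hmem with ⟨e, he, hve⟩
        exact hv (hcl e he v hve)
      rw [hT, pv_count_sources_not_mem xs v hv]

-- keys not in xs are untouched by the index-building fold
theorem pv_index_untouched (xs : List (Int × List Int)) (s : Int) (d : PySem.Dict Int Int)
    (v : Int) (hv : v ∉ xs.map Prod.fst) :
    ((PySem.List.enumerate xs s).foldl (fun d p => d.insert p.2.1 p.1) d).get? v = d.get? v := by
  induction xs generalizing s d with
  | nil => simp [PySem.List.enumerate_nil]
  | cons a t ih =>
      simp only [List.map_cons, List.mem_cons, not_or] at hv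
      rw [PySem.List.enumerate_cons, List.foldl_cons, ih _ _ hv.2]
      dsimp only
      rw [PySem.Dict.get?_insert_of_ne d s hv.1]

-- under distinct keys, the index dict sends the k-th key to s + k
theorem pv_index_pos (xs : List (Int × List Int)) (s : Int) (d : PySem.Dict Int Int)
    (k : Nat) (hk : k < xs.length) (hnd : (xs.map Prod.fst).Nodup) :
    ((PySem.List.enumerate xs s).foldl (fun d p => d.insert p.2.1 p.1) d).get? (xs[k].1)
      = some (s + k) := by
  induction xs generalizing s d k with
  | nil => simp at hk
  | cons a t ih =>
      simp only [List.map_cons, List.nodup_cons] at hnd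
      rw [PySem.List.enumerate_cons, List.foldl_cons]
      cases k with
      | zero =>
          simp only [List.getElem_cons_zero]
          rw [pv_index_untouched t _ _ _ hnd.1, PySem.Dict.get?_insert_self]
          simp
      | succ k =>
          simp only [List.getElem_cons_succ]
          rw [ih _ _ k (by simpa using hk) hnd.2]
          congr 1
          push_cast; ring

-- a map counts like its source at a point where it is injective
theorem pv_count_map_at (f : Int → Int) (l : List Int) (v : Int)
    (h : ∀ u ∈ l, f u = f v → u = v) :
    (l.map f).count (f v) = l.count v := by
  induction l with
  | nil => simp
  | cons a t ih =>
      simp only [List.map_cons, List.count_cons]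
      rw [ih (fun u hu => h u (List.mem_cons_of_mem a hu))]
      by_cases hav : a = v
      · subst hav; simp
      · have : ¬ (f a = f v) := fun hh => hav (h a (List.mem_cons_self ..) hh)
        simp [hav, this]

-- the tail list over enumerate is the constant-key tail list pushed through the index
theorem pv_tails_eq (xs : List (Int × List Int)) (f : Int → Int) (s : Int)
    (h : ∀ (k : Nat) (hk : k < xs.length), f (xs[k].1) = s + k) :
    (PySem.List.enumerate xs s).flatMap (fun p => p.2.2.map (fun _ => p.1))
      = xs.flatMap (fun e => e.2.map (fun _ => f e.1)) := by
  induction xs generalizing s with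
  | nil => simp [PySem.List.enumerate_nil]
  | cons a t ih =>
      rw [PySem.List.enumerate_cons]
      simp only [List.flatMap_cons]
      have h0 : f a.1 = s := by simpa using h 0 (by simp)
      rw [h0, ih (s + 1) (fun k hk => by
        have hh := h (k + 1) (by simpa using Nat.succ_lt_succ hk)
        simp only [List.getElem_cons_succ] at hh
        rw [hh]; push_cast; ring)]

-- ===== VERDICT (by name: the statement is the Claim_ definition above) =====
theorem degree_condition_py_spec : Claim_equal_degree_condition_py := by
  intro digraph _ hpre
  obtain ⟨hnd, hcl⟩ := hpre
  unfold Spec_degree_condition_py degree_condition_py degree_condition_py_alt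
  simp only []
  rw [PySem.List.foldl_prod_mk
    (f := fun (d : PySem.Dict Int Int) e =>
      e.2.foldl (fun d vp => d.insert vp (d.getD vp 0 + 1)) d)
    (g := fun (d : PySem.Dict Int Int) (e : Int × List Int) =>
      d.insert e.1 ((e.2.length : Int)))]
  have h0 : ∀ v : Int,
      (digraph.foldl (fun (d : PySem.Dict Int Int) e => d.insert e.1 0) PySem.Dict.empty).getD v 0 = 0 :=
    fun v => pv_getD_init_zero digraph _ v (by simp)
  have hA : digraph.all (fun e =>
      ((digraph.foldl (fun d e => e.2.foldl (fun d vp => d.insert vp (d.getD vp 0 + 1)) d)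
         (digraph.foldl (fun (d : PySem.Dict Int Int) e => d.insert e.1 0) PySem.Dict.empty)).getD e.1 0
       == (digraph.foldl (fun (d : PySem.Dict Int Int) e => d.insert e.1 ((e.2.length : Int)))
         (digraph.foldl (fun (d : PySem.Dict Int Int) e => d.insert e.1 0) PySem.Dict.empty)).getD e.1 0))
    = digraph.all (fun e =>
        (((digraph.flatMap (fun e => e.2)).count e.1 : Int) == (e.2.length : Int))) := by
    apply pv_all_congr
    intro e he
    have hme : (e.1, e.2) ∈ digraph := by simpa using he
    rw [pv_getD_ind, pv_getD_outd digraph _ e.1 e.2 hnd hme, h0]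
    simp
  rw [hA]
  -- the index function of B
  set idx : PySem.Dict Int Int :=
    (PySem.List.enumerate digraph 0).foldl (fun d p => d.insert p.2.1 p.1) PySem.Dict.empty with hidx
  set f : Int → Int := fun u => (idx.get? u).getD 0 with hfdef
  have hfk : ∀ (k : Nat) (hk : k < digraph.length), f (digraph[k].1) = (k : Int) := by
    intro k hk
    rw [hfdef]
    simp only []
    rw [hidx, pv_index_pos digraph 0 PySem.Dict.empty k hk hnd]
    simp
  have hfk0 : ∀ (k : Nat) (hk : k < digraph.length), f (digraph[k].1) = (0 : Int) + k := by
    intro k hk; rw [hfk k hk]; ring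
  have hinj : ∀ u ∈ digraph.map Prod.fst, ∀ v ∈ digraph.map Prod.fst, f u = f v → u = v := by
    intro u hu v hv hf
    rcases List.mem_iff_getElem.mp hu with ⟨i, hi, hiu⟩
    rcases List.mem_iff_getElem.mp hv with ⟨j, hj, hjv⟩
    rw [List.getElem_map] at hiu hjv
    rw [List.length_map] at hi hj
    rw [← hiu, ← hjv] at hf ⊢
    rw [hfk i hi, hfk j hj] at hf
    have : i = j := by exact_mod_cast hf
    subst this; rfl
  -- heads and tails as mapped versions of the raw head/tail lists
  have hheads : digraph.flatMap (fun e => e.2.map (fun vp => (idx.get? vp).getD 0))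
      = (digraph.flatMap (fun e => e.2)).map f := by
    rw [List.map_flatMap]
  have htails : (PySem.List.enumerate digraph 0).flatMap (fun p => p.2.2.map (fun _ => p.1))
      = (digraph.flatMap (fun e => e.2.map (fun _ => e.1))).map f := by
    rw [pv_tails_eq digraph f 0 hfk0, List.map_flatMap]
    simp
  rw [hheads, htails, Bool.eq_iff_iff, List.all_eq_true, beq_iff_eq,
    PySem.List.sorted_id_eq_sorted_id_iff_perm]
  constructor
  · intro h
    exact ((pv_perm_iff digraph hnd hcl).mpr (fun e he => by simpa using h e he)).map f
  · intro h e he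
    have hperm : (digraph.flatMap (fun e => e.2)).Perm
        (digraph.flatMap (fun e => e.2.map (fun _ => e.1))) := by
      rw [List.perm_iff_count]
      intro v
      by_cases hv : v ∈ digraph.map Prod.fst
      · have hT : ((digraph.flatMap (fun e => e.2)).map f).count (f v)
            = (digraph.flatMap (fun e => e.2)).count v :=
          pv_count_map_at f _ v (fun u hu hfu => by
            rcases List.mem_flatMap.mp hu with ⟨e', he', hue⟩
            exact hinj u (hcl e' he' u hue) v hv hfu)
        have hS : ((digraph.flatMap (fun e => e.2.map (fun _ => e.1))).map f).count (f v)
            = (digraph.flatMap (fun e => e.2.map (fun _ => e.1))).count v :=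
          pv_count_map_at f _ v (fun u hu hfu =>
            hinj u (pv_sources_subset digraph u hu) v hv hfu)
        have := (List.perm_iff_count.mp h) (f v)
        rw [hT, hS] at this
        exact this
      · rw [pv_count_sources_not_mem digraph v hv, List.count_eq_zero]
        intro hmem
        rcases List.mem_flatMap.mp hmem with ⟨e', he', hve⟩
        exact hv (hcl e' he' v hve)
    have := (pv_perm_iff digraph hnd hcl).mp hperm e he
    simpa using this
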